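-- pv_equiv track=rewrite | github.com/Blue-Cheesecake/_-Depreciated-_My-Playground | Basic/Test Squre Equation.py | quadeq
-- ===== SOURCE A (Python) =====
-- def quadeq(given):
--     mini = []
--     lim = range(-50, 50)
--     for a in range(50):
--         for b in lim:
--             for c in lim:
--                 for d in lim:
--                     if a * c == given[0] and (a*d) + (b*c) == given[1] and b * d == given[2]:
--                         mini.append(a)
--                         if a <= mini[0]:
--                             return a, b, c, d
-- ===== SOURCE B (Python) =====
-- def quadeq(given):
--     g0, g1, g2 = given[0], given[1], given[2]
--     for a in range(50):
--         for b in range(-50, 50):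
--             if a == 0 and b == 0:
--                 if g0 == 0 and g1 == 0 and g2 == 0:
--                     return 0, 0, -50, -50
--                 continue
--             if a == 0:
--                 # a*c = g0 forces g0 == 0; then b*c = g1 and b*d = g2 pin c, d
--                 if g0 != 0 or g1 % b != 0 or g2 % b != 0:
--                     continue
--                 c = g1 // b
--                 d = g2 // b
--                 if -50 <= c < 50 and -50 <= d < 50:
--                     return a, b, c, d
--                 continue
--             # a > 0: c = g0/a, then d = (g1 - b*c)/a, then check b*d = g2
--             if g0 % a != 0:
--                 continue
--             c = g0 // a
--             if not (-50 <= c < 50):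
--                 continue
--             t = g1 - b * c
--             if t % a != 0:
--                 continue
--             d = t // a
--             if -50 <= d < 50 and b * d == g2:
--                 return a, b, c, d
--     return None
-- ===== Notes on version B (the rewrite author's own statement) =====
-- stated objective: faster
-- what changed: Instead of brute-forcing all (a,b,c,d) in 50*100^3 nested loops, B iterates only (a,b) and solves c and d directly from the divisibility/linear constraints a*c=g0, a*d+b*c=g1, b*d=g2, checking the remaining equation.
-- outside the precondition, e.g. on quadeq([10000]): A returns None, B raises IndexError
import Mathlib
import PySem

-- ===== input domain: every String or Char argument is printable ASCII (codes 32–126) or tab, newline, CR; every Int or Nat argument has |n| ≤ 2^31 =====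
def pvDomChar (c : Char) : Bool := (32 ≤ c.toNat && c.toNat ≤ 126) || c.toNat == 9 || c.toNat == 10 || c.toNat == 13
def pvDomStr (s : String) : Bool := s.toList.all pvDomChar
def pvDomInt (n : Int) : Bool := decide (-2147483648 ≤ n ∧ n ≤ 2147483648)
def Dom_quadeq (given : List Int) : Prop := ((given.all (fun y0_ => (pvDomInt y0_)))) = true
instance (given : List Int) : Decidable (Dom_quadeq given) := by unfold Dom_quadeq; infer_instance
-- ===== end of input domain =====

-- B replaces A's brute-force scan of all (a,b,c,d) by iterating only (a,b) and solving
-- c, d from the divisibility/linear constraints (objective: faster, asymptotically).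

-- ===== PORT A =====
-- innermost loop 'for d in lim', threading the 'mini' list as state
def quadeqLoopD (g0 g1 g2 a b c : Int) (ds : List Int) (mini : List Int) :
    Option (List Int) × List Int :=
  match ds with
  | [] => (none, mini)
  | d :: rest =>
    if a * c == g0 && (a * d + b * c == g1 && b * d == g2) then
      let mini' := mini ++ [a]                       -- mini.append(a)
      if a ≤ (PySem.List.pyGet? mini' 0).getD 0 then -- a <= mini[0] (mini' nonempty, so exact)
        (some [a, b, c, d], mini')
      else quadeqLoopD g0 g1 g2 a b c rest mini'
    else quadeqLoopD g0 g1 g2 a b c rest mini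

-- 'for c in lim' ('lim = range(-50, 50)' is computed once and reused, as in Python)
def quadeqLoopC (g0 g1 g2 a b : Int) (lim : List Int) (cs : List Int) (mini : List Int) :
    Option (List Int) × List Int :=
  match cs with
  | [] => (none, mini)
  | c :: rest =>
    match quadeqLoopD g0 g1 g2 a b c lim mini with
    | (some r, m) => (some r, m)
    | (none, m) => quadeqLoopC g0 g1 g2 a b lim rest m

-- 'for b in lim'
def quadeqLoopB (g0 g1 g2 a : Int) (lim : List Int) (bs : List Int) (mini : List Int) :
    Option (List Int) × List Int :=
  match bs with
  | [] => (none, mini)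
  | b :: rest =>
    match quadeqLoopC g0 g1 g2 a b lim lim mini with
    | (some r, m) => (some r, m)
    | (none, m) => quadeqLoopB g0 g1 g2 a lim rest m

-- 'for a in range(50)'
def quadeqLoopA (g0 g1 g2 : Int) (lim : List Int) (as_ : List Int) (mini : List Int) :
    Option (List Int) × List Int :=
  match as_ with
  | [] => (none, mini)
  | a :: rest =>
    match quadeqLoopB g0 g1 g2 a lim lim mini with
    | (some r, m) => (some r, m)
    | (none, m) => quadeqLoopA g0 g1 g2 lim rest m

-- given[0..2]: under Pre_quadeq (length ≥ 3) pyGet? is some, so getD 0 is exact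
def quadeq (given : List Int) : Option (List Int) :=
  let g0 := (PySem.List.pyGet? given 0).getD 0
  let g1 := (PySem.List.pyGet? given 1).getD 0
  let g2 := (PySem.List.pyGet? given 2).getD 0
  let lim := PySem.List.pyRange (-50) 50 1
  (quadeqLoopA g0 g1 g2 lim (PySem.List.pyRange 0 50 1) []).1

-- ===== PORT B =====
-- body of B's (a,b) loop: solve c, d directly; none = 'continue'
def quadeqAltBody (g0 g1 g2 a b : Int) : Option (List Int) :=
  if a = 0 ∧ b = 0 then
    if g0 = 0 ∧ g1 = 0 ∧ g2 = 0 then some [0, 0, -50, -50] else none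
  else if a = 0 then
    if g0 ≠ 0 ∨ PySem.Int.mod g1 b ≠ 0 ∨ PySem.Int.mod g2 b ≠ 0 then none
    else
      let c := PySem.Int.floordiv g1 b
      let d := PySem.Int.floordiv g2 b
      if -50 ≤ c ∧ c < 50 ∧ -50 ≤ d ∧ d < 50 then some [a, b, c, d] else none
  else
    if PySem.Int.mod g0 a ≠ 0 then none
    else
      let c := PySem.Int.floordiv g0 a
      if ¬(-50 ≤ c ∧ c < 50) then none
      else
        let t := g1 - b * c
        if PySem.Int.mod t a ≠ 0 then none
        else
          let d := PySem.Int.floordiv t a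
          if -50 ≤ d ∧ d < 50 ∧ b * d = g2 then some [a, b, c, d] else none

-- 'for b in range(-50, 50)'
def quadeqAltLoopB (g0 g1 g2 a : Int) (bs : List Int) : Option (List Int) :=
  match bs with
  | [] => none
  | b :: rest =>
    match quadeqAltBody g0 g1 g2 a b with
    | some r => some r
    | none => quadeqAltLoopB g0 g1 g2 a rest

-- 'for a in range(50)'
def quadeqAltLoopA (g0 g1 g2 : Int) (as_ : List Int) : Option (List Int) :=
  match as_ with
  | [] => none
  | a :: rest =>
    match quadeqAltLoopB g0 g1 g2 a (PySem.List.pyRange (-50) 50 1) with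
    | some r => some r
    | none => quadeqAltLoopA g0 g1 g2 rest

def quadeq_alt (given : List Int) : Option (List Int) :=
  let g0 := (PySem.List.pyGet? given 0).getD 0
  let g1 := (PySem.List.pyGet? given 1).getD 0
  let g2 := (PySem.List.pyGet? given 2).getD 0
  quadeqAltLoopA g0 g1 g2 (PySem.List.pyRange 0 50 1)

-- ===== PRECONDITION & SPEC =====
-- Pre_ excludes lists of fewer than 3 elements, on which A raises IndexError for most
-- coefficient values (it reads given[1]/given[2] lazily) and B always raises.
def Pre_quadeq (given : List Int) : Prop := 3 ≤ given.length

instance (given : List Int) : Decidable (Pre_quadeq given) := by unfold Pre_quadeq; infer_instance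

def pvWitness_quadeq : List Int := [1, 2, 1]

def Spec_quadeq (given : List Int) (out : Option (List Int)) : Prop := out = quadeq_alt given
instance (given : List Int) (out : Option (List Int)) : Decidable (Spec_quadeq given out) := by unfold Spec_quadeq; infer_instance

-- ===== CLAIM (what is proved, stated in full; the proofs are below) =====
def Claim_equal_quadeq : Prop := ∀ (given : List Int), Dom_quadeq given → Pre_quadeq given → Spec_quadeq given (quadeq given)

-- ===== LEMMAS AND PROOFS =====

-- the search predicate of A, and its nested-findSome? normal form
def quadFd (g0 g1 g2 a b c : Int) : Int → Option (List Int) := fun d =>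
  if a * c = g0 ∧ a * d + b * c = g1 ∧ b * d = g2 then some [a, b, c, d] else none

def quadFc (g0 g1 g2 a b : Int) : Int → Option (List Int) := fun c =>
  (PySem.List.pyRange (-50) 50 1).findSome? (quadFd g0 g1 g2 a b c)

def quadInner (g0 g1 g2 a b : Int) : Option (List Int) :=
  (PySem.List.pyRange (-50) 50 1).findSome? (quadFc g0 g1 g2 a b)

theorem findSome?_unique {α : Type} (l : List Int) (f : Int → Option α) (x : Int)
    (h : ∀ y ∈ l, y ≠ x → f y = none) :
    l.findSome? f = if x ∈ l then f x else none := by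
  induction l with
  | nil => simp
  | cons y t ih =>
    by_cases hyx : y = x
    · subst hyx
      cases hfy : f y with
      | some r => simp [List.findSome?_cons, hfy]
      | none =>
        have ht : t.findSome? f = none := by
          rw [List.findSome?_eq_none_iff]
          intro z hz
          by_cases hzx : z = y
          · subst hzx; exact hfy
          · exact h z (List.mem_cons_of_mem _ hz) hzx
        simp [List.findSome?_cons, hfy, ht]
    · have hfy : f y = none := h y (List.mem_cons_self) hyx
      rw [List.findSome?_cons, hfy]
      rw [ih (fun z hz hzx => h z (List.mem_cons_of_mem _ hz) hzx)]
      simp [List.mem_cons, Ne.symm hyx]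

theorem findSome?_all_none {α : Type} (l : List Int) (f : Int → Option α)
    (h : ∀ y ∈ l, f y = none) : l.findSome? f = none := by
  rw [List.findSome?_eq_none_iff]; exact h

-- exact quotient facts for PySem floordiv under divisibility
theorem floordiv_exact (r k : Int) (hd : k ∣ r) :
    k * PySem.Int.floordiv r k = r := by
  have h1 := PySem.Int.floordiv_mul_add_mod r k
  have h2 : PySem.Int.mod r k = 0 := (PySem.Int.mod_eq_zero_iff_dvd r k).mpr hd
  rw [h2] at h1
  linarith [h1, mul_comm (PySem.Int.floordiv r k) k]

-- A's inner double loop equals B's closed-form body at every (a, b) with 0 ≤ a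
-- no solution for any d => the inner findSome? is none
theorem no_sol_d (g0 g1 g2 a b c : Int)
    (h : ∀ d : Int, ¬(a * c = g0 ∧ a * d + b * c = g1 ∧ b * d = g2)) :
    (PySem.List.pyRange (-50) 50 1).findSome? (quadFd g0 g1 g2 a b c) = none := by
  apply findSome?_all_none
  intro d _
  simp only [quadFd]
  rw [if_neg (h d)]

theorem inner_eq_altBody (g0 g1 g2 a b : Int) :
    quadInner g0 g1 g2 a b = quadeqAltBody g0 g1 g2 a b := by
  unfold quadInner quadFc quadeqAltBody
  by_cases ha0 : a = 0
  · subst ha0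
    by_cases hb0 : b = 0
    · subst hb0
      rw [if_pos ⟨rfl, rfl⟩]
      by_cases hg : g0 = 0 ∧ g1 = 0 ∧ g2 = 0
      · obtain ⟨h0, h1, h2⟩ := hg
        subst h0; subst h1; subst h2
        rw [if_pos ⟨rfl, rfl, rfl⟩]
        rw [PySem.List.pyRange_one_cons (by norm_num : (-50:Int) < 50)]
        simp [quadFd, List.findSome?_cons]
      · rw [if_neg hg]
        apply findSome?_all_none
        intro c _
        apply no_sol_d
        intro d
        rintro ⟨h1, h2, h3⟩
        simp only [zero_mul, zero_add] at h1 h2 h3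
        exact hg ⟨h1.symm, h2.symm, h3.symm⟩
    · -- a = 0, b ≠ 0
      rw [if_neg (fun h => hb0 h.2), if_pos rfl]
      by_cases hg0 : g0 = 0
      · by_cases h1 : PySem.Int.mod g1 b = 0
        · by_cases h2 : PySem.Int.mod g2 b = 0
          · have hdv1 : b ∣ g1 := (PySem.Int.mod_eq_zero_iff_dvd g1 b).mp h1
            have hdv2 : b ∣ g2 := (PySem.Int.mod_eq_zero_iff_dvd g2 b).mp h2
            have hc0 : b * PySem.Int.floordiv g1 b = g1 := floordiv_exact g1 b hdv1
            have hd0 : b * PySem.Int.floordiv g2 b = g2 := floordiv_exact g2 b hdv2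
            rw [if_neg (by push_neg; exact ⟨hg0, h1, h2⟩)]
            rw [findSome?_unique _ _ (PySem.Int.floordiv g1 b)
              (by
                intro y _ hy
                apply no_sol_d
                rintro d ⟨_, hbc, _⟩
                apply hy
                apply mul_left_cancel₀ hb0
                rw [hc0]
                linarith)]
            rw [findSome?_unique _ (quadFd g0 g1 g2 0 b (PySem.Int.floordiv g1 b))
              (PySem.Int.floordiv g2 b)
              (by
                intro y _ hy
                simp only [quadFd]
                rw [if_neg]
                rintro ⟨_, _, hbd⟩
                exact hy (mul_left_cancel₀ hb0 (by rw [hd0, hbd])))]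
            have hcond : 0 * PySem.Int.floordiv g1 b = g0 ∧
                0 * PySem.Int.floordiv g2 b + b * PySem.Int.floordiv g1 b = g1 ∧
                b * PySem.Int.floordiv g2 b = g2 :=
              ⟨by rw [zero_mul, hg0], by rw [zero_mul, zero_add, hc0], hd0⟩
            simp only [quadFd]
            rw [if_pos hcond]
            simp only [PySem.List.mem_pyRange_one]
            split_ifs <;> tauto
          · rw [if_pos (Or.inr (Or.inr h2))]
            apply findSome?_all_none
            intro c _
            apply no_sol_d
            rintro d ⟨_, _, hbd⟩
            exact h2 ((PySem.Int.mod_eq_zero_iff_dvd g2 b).mpr ⟨d, by linarith⟩)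
        · rw [if_pos (Or.inr (Or.inl h1))]
          apply findSome?_all_none
          intro c _
          apply no_sol_d
          rintro d ⟨_, hbc, _⟩
          exact h1 ((PySem.Int.mod_eq_zero_iff_dvd g1 b).mpr ⟨c, by linarith⟩)
      · rw [if_pos (Or.inl hg0)]
        apply findSome?_all_none
        intro c _
        apply no_sol_d
        rintro d ⟨hac, _, _⟩
        exact hg0 (by linarith)
  · -- a ≠ 0
    rw [if_neg (fun h => ha0 h.1), if_neg ha0]
    by_cases h0 : PySem.Int.mod g0 a = 0
    · have hdv0 : a ∣ g0 := (PySem.Int.mod_eq_zero_iff_dvd g0 a).mp h0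
      have hc0 : a * PySem.Int.floordiv g0 a = g0 := floordiv_exact g0 a hdv0
      rw [if_neg (not_not.mpr h0)]
      rw [findSome?_unique _ _ (PySem.Int.floordiv g0 a)
        (by
          intro y _ hy
          apply no_sol_d
          rintro d ⟨hac, _, _⟩
          exact hy (mul_left_cancel₀ ha0 (by rw [hc0, hac])))]
      by_cases ht : PySem.Int.mod (g1 - b * PySem.Int.floordiv g0 a) a = 0
      · have hdvt : a ∣ (g1 - b * PySem.Int.floordiv g0 a) :=
          (PySem.Int.mod_eq_zero_iff_dvd _ a).mp ht
        have hd0 : a * PySem.Int.floordiv (g1 - b * PySem.Int.floordiv g0 a) a =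
            g1 - b * PySem.Int.floordiv g0 a := floordiv_exact _ a hdvt
        rw [findSome?_unique _ (quadFd g0 g1 g2 a b (PySem.Int.floordiv g0 a))
          (PySem.Int.floordiv (g1 - b * PySem.Int.floordiv g0 a) a)
          (by
            intro y _ hy
            simp only [quadFd]
            rw [if_neg]
            rintro ⟨_, had, _⟩
            exact hy (mul_left_cancel₀ ha0 (by rw [hd0]; linarith)))]
        simp only [quadFd]
        by_cases hbd : b * PySem.Int.floordiv (g1 - b * PySem.Int.floordiv g0 a) a = g2
        · have hcond : a * PySem.Int.floordiv g0 a = g0 ∧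
              a * PySem.Int.floordiv (g1 - b * PySem.Int.floordiv g0 a) a +
                b * PySem.Int.floordiv g0 a = g1 ∧
              b * PySem.Int.floordiv (g1 - b * PySem.Int.floordiv g0 a) a = g2 :=
            ⟨hc0, by linarith [hd0], hbd⟩
          rw [if_pos hcond]
          simp only [PySem.List.mem_pyRange_one]
          split_ifs <;> tauto
        · have hncond : ¬(a * PySem.Int.floordiv g0 a = g0 ∧
              a * PySem.Int.floordiv (g1 - b * PySem.Int.floordiv g0 a) a +
                b * PySem.Int.floordiv g0 a = g1 ∧
              b * PySem.Int.floordiv (g1 - b * PySem.Int.floordiv g0 a) a = g2) :=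
            fun h => hbd h.2.2
          rw [if_neg hncond]
          simp only [PySem.List.mem_pyRange_one]
          split_ifs <;> first | rfl | tauto
      · have hnone : (PySem.List.pyRange (-50) 50 1).findSome? (quadFd g0 g1 g2 a b (PySem.Int.floordiv g0 a)) = none := by
          apply no_sol_d
          rintro d ⟨_, had, _⟩
          exact ht ((PySem.Int.mod_eq_zero_iff_dvd _ a).mpr ⟨d, by linarith⟩)
        rw [hnone]
        simp [PySem.List.mem_pyRange_one, ht]
    · rw [if_pos h0]
      apply findSome?_all_none
      intro c _
      apply no_sol_d
      rintro d ⟨hac, _, _⟩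
      exact h0 ((PySem.Int.mod_eq_zero_iff_dvd g0 a).mpr ⟨c, by linarith⟩)

-- flattening A's loops (with mini = []) to findSome? form
theorem loopD_eq (g0 g1 g2 a b c : Int) (ds : List Int) :
    quadeqLoopD g0 g1 g2 a b c ds [] =
      (ds.findSome? (quadFd g0 g1 g2 a b c)).elim ((none : Option (List Int)), ([] : List Int))
        (fun r => (some r, [a])) := by
  induction ds with
  | nil => simp [quadeqLoopD]
  | cons d rest ih =>
    by_cases h : a * c = g0 ∧ a * d + b * c = g1 ∧ b * d = g2
    · simp [quadeqLoopD, h, quadFd, List.findSome?_cons, PySem.List.pyGet?_zero_cons]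
    · simp [quadeqLoopD, h, quadFd, List.findSome?_cons, ih]

theorem loopC_eq (g0 g1 g2 a b : Int) (cs : List Int) :
    quadeqLoopC g0 g1 g2 a b (PySem.List.pyRange (-50) 50 1) cs [] =
      (cs.findSome? (quadFc g0 g1 g2 a b)).elim ((none : Option (List Int)), ([] : List Int))
        (fun r => (some r, [a])) := by
  induction cs with
  | nil => simp [quadeqLoopC]
  | cons c rest ih =>
    rw [quadeqLoopC, loopD_eq]
    cases h : (PySem.List.pyRange (-50) 50 1).findSome? (quadFd g0 g1 g2 a b c) with
    | some r => simp [List.findSome?_cons, quadFc, h]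
    | none => simp [List.findSome?_cons, quadFc, h, ih]

theorem loopB_eq (g0 g1 g2 a : Int) (bs : List Int) :
    quadeqLoopB g0 g1 g2 a (PySem.List.pyRange (-50) 50 1) bs [] =
      (bs.findSome? (fun b => quadInner g0 g1 g2 a b)).elim
        ((none : Option (List Int)), ([] : List Int)) (fun r => (some r, [a])) := by
  induction bs with
  | nil => simp [quadeqLoopB]
  | cons b rest ih =>
    rw [quadeqLoopB, loopC_eq]
    cases h : (PySem.List.pyRange (-50) 50 1).findSome? (quadFc g0 g1 g2 a b) with
    | some r => simp [List.findSome?_cons, quadInner, quadFc, h]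
    | none => simp [List.findSome?_cons, quadInner, quadFc, h, ih]

theorem loopA_eq (g0 g1 g2 : Int) (as_ : List Int) :
    (quadeqLoopA g0 g1 g2 (PySem.List.pyRange (-50) 50 1) as_ []).1 =
      as_.findSome? (fun a =>
        (PySem.List.pyRange (-50) 50 1).findSome? (fun b => quadInner g0 g1 g2 a b)) := by
  induction as_ with
  | nil => simp [quadeqLoopA]
  | cons a rest ih =>
    rw [quadeqLoopA, loopB_eq]
    cases h : (PySem.List.pyRange (-50) 50 1).findSome? (fun b => quadInner g0 g1 g2 a b) with
    | some r => simp [List.findSome?_cons, h]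
    | none => simp [List.findSome?_cons, h, ih]

-- flattening B's loops
theorem altLoopB_eq (g0 g1 g2 a : Int) (bs : List Int) :
    quadeqAltLoopB g0 g1 g2 a bs = bs.findSome? (fun b => quadeqAltBody g0 g1 g2 a b) := by
  induction bs with
  | nil => simp [quadeqAltLoopB]
  | cons b rest ih =>
    rw [quadeqAltLoopB]
    cases h : quadeqAltBody g0 g1 g2 a b with
    | some r => simp [List.findSome?_cons, h]
    | none => simp [List.findSome?_cons, h, ih]

theorem altLoopA_eq (g0 g1 g2 : Int) (as_ : List Int) :
    quadeqAltLoopA g0 g1 g2 as_ =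
      as_.findSome? (fun a =>
        (PySem.List.pyRange (-50) 50 1).findSome? (fun b => quadeqAltBody g0 g1 g2 a b)) := by
  induction as_ with
  | nil => simp [quadeqAltLoopA]
  | cons a rest ih =>
    rw [quadeqAltLoopA, altLoopB_eq]
    cases h : (PySem.List.pyRange (-50) 50 1).findSome? (fun b => quadeqAltBody g0 g1 g2 a b) with
    | some r => simp [List.findSome?_cons, h]
    | none => simp [List.findSome?_cons, h, ih]

theorem findSome?_congr_mem {α : Type} (l : List Int) (f g : Int → Option α)
    (h : ∀ x ∈ l, f x = g x) : l.findSome? f = l.findSome? g := by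
  induction l with
  | nil => rfl
  | cons x t ih =>
    rw [List.findSome?_cons, List.findSome?_cons, h x (List.mem_cons_self)]
    cases g x <;> simp [ih (fun z hz => h z (List.mem_cons_of_mem _ hz))]

theorem main_eq (g0 g1 g2 : Int) :
    (quadeqLoopA g0 g1 g2 (PySem.List.pyRange (-50) 50 1) (PySem.List.pyRange 0 50 1) []).1 =
      quadeqAltLoopA g0 g1 g2 (PySem.List.pyRange 0 50 1) := by
  rw [loopA_eq, altLoopA_eq]
  apply findSome?_congr_mem
  intro a _
  apply findSome?_congr_mem
  intro b _
  exact inner_eq_altBody g0 g1 g2 a b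

-- ===== VERDICT (by name: the statement is the Claim_ definition above) =====
theorem quadeq_spec : Claim_equal_quadeq := by
  intro given _ _
  unfold Spec_quadeq quadeq quadeq_alt
  exact main_eq _ _ _
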